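-- pv_equiv track=rewrite | github.com/Storik4pro/goodbyeDPI-UI | src/Backend/goodCheckHelper.py | extract_group_lines
-- ===== SOURCE A (Python) =====
-- def extract_group_lines(content: str) -> list:
--     groups = []
--     current_group = []
--     for line in content.splitlines():
--         line = line.strip()
--         if line.startswith("#KEY#"):
--             current_group.append(line)
--         elif line == "#ENDGROUP#":
--             if current_group:
--                 groups.append(current_group)
--                 current_group = []
--     return groups
-- ===== SOURCE B (Python) =====
-- def extract_group_lines(content: str) -> list:
--     stripped = [line.strip() for line in content.splitlines()]
--     segments = []
--     rest = stripped
--     while "#ENDGROUP#" in rest: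
--         i = rest.index("#ENDGROUP#")
--         segments.append(rest[:i])
--         rest = rest[i + 1:]
--     selected = [[l for l in seg if l.startswith("#KEY#")] for seg in segments]
--     return [keys for keys in selected if keys]
-- ===== Notes on version B (the rewrite author's own statement) =====
-- stated objective: alternative
-- what changed: Replaces A's incremental flush-on-marker accumulator with a split phase (cut the stripped lines into '#ENDGROUP#'-terminated segments via index, dropping the unterminated tail) followed by a per-segment filter/keep-nonempty phase.
import Mathlib
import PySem

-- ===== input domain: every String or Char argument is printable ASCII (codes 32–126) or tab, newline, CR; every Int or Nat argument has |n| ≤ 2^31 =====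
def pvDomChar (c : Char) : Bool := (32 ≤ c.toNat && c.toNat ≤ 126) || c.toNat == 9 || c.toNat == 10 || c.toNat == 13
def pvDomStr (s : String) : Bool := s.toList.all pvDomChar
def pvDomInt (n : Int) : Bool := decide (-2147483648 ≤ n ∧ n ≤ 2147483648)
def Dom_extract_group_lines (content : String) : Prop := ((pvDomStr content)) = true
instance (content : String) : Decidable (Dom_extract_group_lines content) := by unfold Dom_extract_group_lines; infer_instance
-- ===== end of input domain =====

-- B rebuilds A's flush-on-marker accumulator as split-into-terminated-segments then filter per segment; alternative decomposition, same cost.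

-- ===== PORT A =====
def pvStepA (st : List (List String) × List String) (line : String) :
    List (List String) × List String :=
  let line := PySem.Str.strip line
  if PySem.Str.startswith line "#KEY#" then (st.1, st.2 ++ [line])
  else if line = "#ENDGROUP#" then
    (if !st.2.isEmpty then (st.1 ++ [st.2], ([] : List String)) else st)
  else st

def extract_group_lines (content : String) : List (List String) :=
  ((PySem.Str.splitlines content).foldl pvStepA ([], [])).1

-- ===== PORT B =====
def pvFilterKeys (seg : List String) : List String :=
  seg.filter (fun l => PySem.Str.startswith l "#KEY#")

-- the while-loop of Source B: `"#ENDGROUP#" in rest` + `rest.index(...)` are the two faces of index?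
def pvSplitSegs (rest : List String) : List (List String) :=
  match h : PySem.List.index? rest "#ENDGROUP#" with
  | none => []
  | some i => rest.take i :: pvSplitSegs (rest.drop (i + 1))
termination_by rest.length
decreasing_by
  have hne : rest ≠ [] := by
    rintro rfl
    rw [PySem.List.index?_eq_idxOf?] at h
    simp at h
  cases rest with
  | nil => exact absurd rfl hne
  | cons a l => simp

def extract_group_lines_alt (content : String) : List (List String) :=
  let stripped := (PySem.Str.splitlines content).map PySem.Str.strip
  let segments := pvSplitSegs stripped
  let selected := segments.map pvFilterKeys
  selected.filter (fun keys => !keys.isEmpty)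

-- ===== PRECONDITION & SPEC =====
def Spec_extract_group_lines (content : String) (out : List (List String)) : Prop := out = extract_group_lines_alt content
instance (content : String) (out : List (List String)) : Decidable (Spec_extract_group_lines content out) := by unfold Spec_extract_group_lines; infer_instance

-- ===== CLAIM (what is proved, stated in full; the proofs are below) =====
def Claim_equal_extract_group_lines : Prop := ∀ (content : String), Dom_extract_group_lines content → Spec_extract_group_lines content (extract_group_lines content)

-- ===== LEMMAS AND PROOFS =====

-- A's result from state (g, c) over already-stripped lines
def pvGroupsOf (c : List String) : List String → List (List String)
  | [] => []
  | l :: ls =>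
    if PySem.Str.startswith l "#KEY#" then pvGroupsOf (c ++ [l]) ls
    else if l = "#ENDGROUP#" then (if !c.isEmpty then [c] else []) ++ pvGroupsOf [] ls
    else pvGroupsOf c ls

-- B's post-processing with a pending prefix for the first segment
def pvPost (c : List String) : List (List String) → List (List String)
  | [] => []
  | s :: ss =>
    (if !(c ++ pvFilterKeys s).isEmpty then [c ++ pvFilterKeys s] else []) ++ pvPost [] ss

theorem pvFoldA_eq (ls : List String) : ∀ (g : List (List String)) (c : List String),
    (ls.foldl pvStepA (g, c)).1 = g ++ pvGroupsOf c (ls.map PySem.Str.strip) := by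
  induction ls with
  | nil => intro g c; simp [pvGroupsOf]
  | cons l ls ih =>
    intro g c
    simp only [List.foldl_cons, List.map_cons, pvStepA, pvGroupsOf]
    split_ifs with h1 h2 h3
    · exact ih g (c ++ [PySem.Str.strip l])
    · rw [ih (g ++ [c]) []]; simp
    · have hc : c = [] := by simpa using h3
      subst hc
      rw [ih g []]; simp
    · exact ih g c

theorem pvSplitSegs_nil : pvSplitSegs [] = [] := by
  rw [pvSplitSegs]
  split
  · rfl
  · rename_i i h
    rw [PySem.List.index?_eq_idxOf?] at h
    simp at h

theorem pvSplitSegs_cons (l : String) (ls : List String) :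
    pvSplitSegs (l :: ls) =
      if l = "#ENDGROUP#" then [] :: pvSplitSegs ls
      else match pvSplitSegs ls with
        | [] => []
        | s :: ss => (l :: s) :: ss := by
  by_cases hl : l = "#ENDGROUP#"
  · subst hl
    rw [pvSplitSegs, if_pos rfl]
    split
    · rename_i h
      rw [PySem.List.index?_cons_self] at h
      exact absurd h (by simp)
    · rename_i i h
      rw [PySem.List.index?_cons_self] at h
      injection h with h
      subst h
      simp
  · rw [pvSplitSegs, if_neg hl]
    have hne : PySem.List.index? (l :: ls) "#ENDGROUP#" =
        (PySem.List.index? ls "#ENDGROUP#").map (· + 1) :=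
      PySem.List.index?_cons_of_ne ls hl
    split
    · rename_i h
      rw [hne] at h
      cases hi : PySem.List.index? ls "#ENDGROUP#" with
      | none =>
        rw [pvSplitSegs, hi]
      | some i => rw [hi] at h; simp at h
    · rename_i i h
      rw [hne] at h
      cases hi : PySem.List.index? ls "#ENDGROUP#" with
      | none => rw [hi] at h; simp at h
      | some j =>
        rw [hi] at h
        simp only [Option.map_some] at h
        cases h
        conv_rhs => rw [pvSplitSegs, hi]
        simp [List.take_succ_cons, List.drop_succ_cons]

theorem pvGroupsOf_eq (ls : List String) : ∀ (c : List String),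
    pvGroupsOf c ls = pvPost c (pvSplitSegs ls) := by
  induction ls with
  | nil => intro c; rw [pvSplitSegs_nil]; rfl
  | cons l ls ih =>
    intro c
    rw [pvSplitSegs_cons]
    by_cases hl : l = "#ENDGROUP#"
    · subst hl
      have hk : PySem.Str.startswith "#ENDGROUP#" "#KEY#" = false := by decide
      rw [if_pos rfl]
      show (if PySem.Str.startswith "#ENDGROUP#" "#KEY#" then _ else _) = _
      rw [hk]
      simp only [Bool.false_eq_true, if_false]
      show _ ++ pvGroupsOf [] ls =
        (if !(c ++ pvFilterKeys []).isEmpty then [c ++ pvFilterKeys []] else []) ++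
          pvPost [] (pvSplitSegs ls)
      rw [ih []]
      simp [pvFilterKeys]
    · rw [if_neg hl]
      have key_cons : ∀ s, pvFilterKeys (l :: s) =
          (if PySem.Str.startswith l "#KEY#" then [l] else []) ++ pvFilterKeys s := by
        intro s
        simp only [pvFilterKeys, List.filter_cons]
        split <;> rename_i h <;> simp_all
      show (if PySem.Str.startswith l "#KEY#" then pvGroupsOf (c ++ [l]) ls
            else if l = "#ENDGROUP#" then _ else pvGroupsOf c ls) = _
      by_cases hk : PySem.Str.startswith l "#KEY#" = true
      · rw [if_pos hk, ih (c ++ [l])]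
        cases hs : pvSplitSegs ls with
        | nil => rfl
        | cons s ss =>
          show pvPost (c ++ [l]) (s :: ss) = pvPost c ((l :: s) :: ss)
          simp only [pvPost]
          rw [key_cons s, if_pos hk]
          simp
      · rw [if_neg hk, if_neg hl, ih c]
        cases hs : pvSplitSegs ls with
        | nil => rfl
        | cons s ss =>
          show pvPost c (s :: ss) = pvPost c ((l :: s) :: ss)
          simp only [pvPost]
          rw [key_cons s, if_neg hk]
          simp

theorem pvPost_nil_eq (ss : List (List String)) :
    pvPost [] ss = (ss.map pvFilterKeys).filter (fun keys => !keys.isEmpty) := by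
  induction ss with
  | nil => rfl
  | cons s ss ih =>
    simp only [pvPost, List.nil_append, List.map_cons, List.filter_cons, ih]
    by_cases h : (!(pvFilterKeys s).isEmpty) = true
    · simp [h]
    · simp only [Bool.not_eq_true] at h
      simp [h]

-- ===== VERDICT (by name: the statement is the Claim_ definition above) =====
theorem extract_group_lines_spec : Claim_equal_extract_group_lines := by
  intro content _
  unfold Spec_extract_group_lines extract_group_lines extract_group_lines_alt
  rw [pvFoldA_eq, pvGroupsOf_eq, pvPost_nil_eq]
  simp
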